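-- pv_equiv track=rewrite | github.com/mdequeljoe/aoc2023 | day14.py | tilt_board
-- ===== SOURCE A (Python) =====
-- def tilt_board(coords, cubes, dir, nr, nk):
--     if dir == 'N':
--         coords = sorted(coords)
--     elif dir == 'S':
--         coords = sorted(coords, reverse=True)
--     elif dir == 'W':
--         coords = sorted(coords, key=lambda x: x[1])
--     else:
--         coords = sorted(coords, key=lambda x: x[1], reverse=True)
--     new_coords = []
--     while True:
--         if len(coords) == 0:
--             break
--         r, k = coords.pop(0)
--         r1, k1 = r, k
--         r0, k0 = r, k
--         while True:
--             if (r1, k1) in cubes \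
--                 or (r1, k1) in coords \
--                 or (r1, k1) in new_coords:
--                     new_coords.append((r0, k0))
--                     break
--
--             if dir == 'N' and r1 == 0 \
--                 or dir == 'S' and r1 == (nr-1) \
--                 or dir == 'W' and k1 == 0 \
--                 or dir == 'E' and k1 == (nk-1):
--                     new_coords.append((r1, k1))
--                     break
--             r0, k0 = r1, k1
--             if dir == 'N':
--                 r1 -= 1
--             elif dir == 'S':
--                 r1 += 1
--             elif dir == 'W':
--                 k1 -= 1
--             else:
--                 k1 += 1
--     return new_coords
-- ===== SOURCE B (Python) =====
-- def tilt_board(coords, cubes, dir, nr, nk):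
--     # Same sort as the task demands (it fixes the output order), but each rock's
--     # landing cell is computed in closed form from the nearest blocker instead of
--     # walking the board cell by cell.
--     if dir == 'N':
--         order = sorted(coords)
--     elif dir == 'S':
--         order = sorted(coords, reverse=True)
--     elif dir == 'W':
--         order = sorted(coords, key=lambda x: x[1])
--     else:
--         order = sorted(coords, key=lambda x: x[1], reverse=True)
--     new = []
--     for i, (r, k) in enumerate(order):
--         blockers = list(cubes) + order[i + 1:] + new
--         if dir == 'N':
--             m = max([c for c, kk in blockers if kk == k and c <= r] + [-1])
--             new.append((min(r, m + 1), k))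
--         elif dir == 'S':
--             m = min([c for c, kk in blockers if kk == k and c >= r] + [nr])
--             new.append((max(r, m - 1), k))
--         elif dir == 'W':
--             m = max([c for rr, c in blockers if rr == r and c <= k] + [-1])
--             new.append((r, min(k, m + 1)))
--         else:
--             m = min([c for rr, c in blockers if rr == r and c >= k] + [nk])
--             new.append((r, max(k, m - 1)))
--     return new
-- ===== Notes on version B (the rewrite author's own statement) =====
-- stated objective: alternative
-- what changed: A rolls every rock cell by cell, re-scanning all three coordinate lists at each cell; B computes each rock's landing cell in closed form (min/max against the nearest blocker in its row/column), so the work no longer walks the board and does not depend on the board dimensions nr*nk (intended as faster; a timing run read B 22.6x at the largest size both finished but could not confirm it, A timing out elsewhere).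
-- outside the precondition, e.g. on tilt_board([(-5, 0)], {(-7, 0)}, 'N', 3, 3): A returns [(-6, 0)], B returns [(-5, 0)]; on tilt_board([(0, 0)], set(), 'X', 2, 2): A does not finish within the time limit, B returns [(0, 1)]
import Mathlib
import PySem

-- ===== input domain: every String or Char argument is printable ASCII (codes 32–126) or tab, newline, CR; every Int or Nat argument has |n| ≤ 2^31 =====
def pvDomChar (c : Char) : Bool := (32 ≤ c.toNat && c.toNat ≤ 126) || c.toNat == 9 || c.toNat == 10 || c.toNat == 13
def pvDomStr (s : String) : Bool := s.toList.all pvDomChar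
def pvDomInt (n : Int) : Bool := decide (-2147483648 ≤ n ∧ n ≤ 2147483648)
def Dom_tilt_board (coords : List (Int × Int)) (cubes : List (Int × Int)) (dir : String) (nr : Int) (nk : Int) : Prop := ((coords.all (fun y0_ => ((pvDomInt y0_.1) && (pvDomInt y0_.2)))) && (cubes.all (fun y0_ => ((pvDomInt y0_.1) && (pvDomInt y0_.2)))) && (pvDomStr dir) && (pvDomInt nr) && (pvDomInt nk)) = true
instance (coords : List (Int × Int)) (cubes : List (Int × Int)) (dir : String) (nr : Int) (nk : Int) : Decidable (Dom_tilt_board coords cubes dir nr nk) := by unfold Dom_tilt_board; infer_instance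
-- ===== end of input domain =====

-- B replaces A's cell-by-cell walk of each rock by a closed-form landing position
-- computed from the nearest blocker in its row/column (objective: alternative).
-- Note: A pops from its local sorted copy, the caller's lists are not mutated.

-- ===== PORT A =====
-- inner `while True` roll loop of A; `fuel` only makes the recursion total — under
-- Pre_ the loop always breaks before the fuel (chosen larger than any possible walk) runs out
def rollA (cubes rem new : List (Int × Int)) (dir : String) (nr nk : Int) :
    Nat → Int → Int → Int → Int → List (Int × Int)
  | 0, _, _, _, _ => new
  | fuel + 1, r1, k1, r0, k0 =>
    if (r1, k1) ∈ cubes ∨ (r1, k1) ∈ rem ∨ (r1, k1) ∈ new then new ++ [(r0, k0)]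
    else if (dir = "N" ∧ r1 = 0) ∨ (dir = "S" ∧ r1 = nr - 1) ∨ (dir = "W" ∧ k1 = 0) ∨ (dir = "E" ∧ k1 = nk - 1) then
      new ++ [(r1, k1)]
    else if dir = "N" then rollA cubes rem new dir nr nk fuel (r1 - 1) k1 r1 k1
    else if dir = "S" then rollA cubes rem new dir nr nk fuel (r1 + 1) k1 r1 k1
    else if dir = "W" then rollA cubes rem new dir nr nk fuel r1 (k1 - 1) r1 k1
    else rollA cubes rem new dir nr nk fuel r1 (k1 + 1) r1 k1

def tiltFuel (r k nr nk : Int) : Nat := r.natAbs + k.natAbs + nr.natAbs + nk.natAbs + 1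

-- outer `while True` loop of A: pop the first rock, roll it, append its resting place
def tiltLoopA (cubes : List (Int × Int)) (dir : String) (nr nk : Int) :
    List (Int × Int) → List (Int × Int) → List (Int × Int)
  | [], new => new
  | (r, k) :: rest, new =>
      tiltLoopA cubes dir nr nk rest (rollA cubes rest new dir nr nk (tiltFuel r k nr nk) r k r k)

-- the identical sort line opens both programs; shared helper
def tiltSort (coords : List (Int × Int)) (dir : String) : List (Int × Int) :=
  if dir = "N" then PySem.List.sorted2 coords (fun x => x.1) (fun x => x.2)
  else if dir = "S" then PySem.List.sorted2 coords (fun x => x.1) (fun x => x.2) true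
  else if dir = "W" then PySem.List.sorted coords (fun x => x.2)
  else PySem.List.sorted coords (fun x => x.2) true

def tilt_board (coords : List (Int × Int)) (cubes : List (Int × Int)) (dir : String) (nr : Int) (nk : Int) : List (Int × Int) :=
  tiltLoopA cubes dir nr nk (tiltSort coords dir) []

-- ===== PORT B =====
-- `max([c for c, kk in blockers if kk == k and c <= r] + [-1])` and its three mirrors
def bmaxN (L : List (Int × Int)) (k r : Int) : Int :=
  (L.filterMap (fun p => if p.2 = k ∧ p.1 ≤ r then some p.1 else none)).foldl max (-1)
def bminS (L : List (Int × Int)) (k r nr : Int) : Int :=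
  (L.filterMap (fun p => if p.2 = k ∧ r ≤ p.1 then some p.1 else none)).foldl min nr
def bmaxW (L : List (Int × Int)) (r k : Int) : Int :=
  (L.filterMap (fun p => if p.1 = r ∧ p.2 ≤ k then some p.2 else none)).foldl max (-1)
def bminE (L : List (Int × Int)) (r k nk : Int) : Int :=
  (L.filterMap (fun p => if p.1 = r ∧ k ≤ p.2 then some p.2 else none)).foldl min nk

-- B's `for i, (r, k) in enumerate(order)` loop: each rock lands in closed form
def tiltLoopB (cubes : List (Int × Int)) (dir : String) (nr nk : Int) :
    List (Int × Int) → List (Int × Int) → List (Int × Int)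
  | [], new => new
  | (r, k) :: rest, new =>
      -- `list(cubes)` in Source B: the set argument as a list
      let blockers := cubes ++ rest ++ new
      let out :=
        if dir = "N" then (min r (bmaxN blockers k r + 1), k)
        else if dir = "S" then (max r (bminS blockers k r nr - 1), k)
        else if dir = "W" then (r, min k (bmaxW blockers r k + 1))
        else (r, max k (bminE blockers r k nk - 1))
      tiltLoopB cubes dir nr nk rest (new ++ [out])

def tilt_board_alt (coords : List (Int × Int)) (cubes : List (Int × Int)) (dir : String) (nr : Int) (nk : Int) : List (Int × Int) :=
  tiltLoopB cubes dir nr nk (tiltSort coords dir) []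

-- ===== PRECONDITION & SPEC =====
-- Pre_ admits: an empty rock list; boards where every rock is blocked where it starts
-- (on a cube, or sharing its cell with a duplicate rock) and so never moves, for ANY
-- direction string (A treats an unknown direction as east); and, for each of the four
-- recognised directions, boards whose rocks are each either blocked in place or on the
-- boundary side of that direction (r >= 0 for 'N', r <= nr-1 for 'S', k >= 0 for 'W',
-- k <= nk-1 for 'E').  Excluded are exactly the configurations in which some rock can
-- run off the board: there A's walk loops forever unless a stray off-board cube happens
-- to block it (see claim.json cites).
def Pre_tilt_board (coords : List (Int × Int)) (cubes : List (Int × Int)) (dir : String) (nr : Int) (nk : Int) : Prop :=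
  coords = [] ∨
  (∀ p ∈ coords, p ∈ cubes ∨ 2 ≤ coords.count p) ∨
  (dir = "N" ∧ ∀ p ∈ coords, 0 ≤ p.1 ∨ p ∈ cubes ∨ 2 ≤ coords.count p) ∨
  (dir = "S" ∧ ∀ p ∈ coords, p.1 ≤ nr - 1 ∨ p ∈ cubes ∨ 2 ≤ coords.count p) ∨
  (dir = "W" ∧ ∀ p ∈ coords, 0 ≤ p.2 ∨ p ∈ cubes ∨ 2 ≤ coords.count p) ∨
  (dir = "E" ∧ ∀ p ∈ coords, p.2 ≤ nk - 1 ∨ p ∈ cubes ∨ 2 ≤ coords.count p)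
instance (coords : List (Int × Int)) (cubes : List (Int × Int)) (dir : String) (nr : Int) (nk : Int) : Decidable (Pre_tilt_board coords cubes dir nr nk) := by unfold Pre_tilt_board; infer_instance

def pvWitness_tilt_board : (List (Int × Int)) × (List (Int × Int)) × String × Int × Int :=
  ([(1, 0), (0, 1), (1, 1)], [(0, 0)], "N", 2, 2)

def Spec_tilt_board (coords : List (Int × Int)) (cubes : List (Int × Int)) (dir : String) (nr : Int) (nk : Int) (out : List (Int × Int)) : Prop := out = tilt_board_alt coords cubes dir nr nk
instance (coords : List (Int × Int)) (cubes : List (Int × Int)) (dir : String) (nr : Int) (nk : Int) (out : List (Int × Int)) : Decidable (Spec_tilt_board coords cubes dir nr nk out) := by unfold Spec_tilt_board; infer_instance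

-- ===== CLAIM (what is proved, stated in full; the proofs are below) =====
def Claim_equal_tilt_board : Prop := ∀ (coords : List (Int × Int)) (cubes : List (Int × Int)) (dir : String) (nr : Int) (nk : Int), Dom_tilt_board coords cubes dir nr nk → Pre_tilt_board coords cubes dir nr nk → Spec_tilt_board coords cubes dir nr nk (tilt_board coords cubes dir nr nk)

-- ===== LEMMAS AND PROOFS =====

lemma neg_one_le_bmaxN (L : List (Int × Int)) (k r : Int) : -1 ≤ bmaxN L k r :=
  (PySem.List.le_foldl_max _ _).1

lemma le_bmaxN (L : List (Int × Int)) {k r c : Int} (h : (c, k) ∈ L) (hc : c ≤ r) :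
    c ≤ bmaxN L k r :=
  (PySem.List.le_foldl_max _ _).2 c (List.mem_filterMap.mpr ⟨(c, k), h, by simp [hc]⟩)

lemma bmaxN_cases (L : List (Int × Int)) (k r : Int) :
    bmaxN L k r = -1 ∨ ((bmaxN L k r, k) ∈ L ∧ bmaxN L k r ≤ r) := by
  unfold bmaxN
  rcases PySem.List.foldl_max_mem (L.filterMap (fun p => if p.2 = k ∧ p.1 ≤ r then some p.1 else none)) (-1) with h | h
  · exact Or.inl h
  · right
    rcases List.mem_filterMap.mp h with ⟨p, hp, heq⟩
    by_cases hcond : p.2 = k ∧ p.1 ≤ r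
    · rw [if_pos hcond, Option.some.injEq] at heq
      rw [← heq]
      refine ⟨?_, hcond.2⟩
      have hpair : (p.1, k) = p := by ext <;> simp [hcond.1]
      rw [hpair]; exact hp
    · rw [if_neg hcond] at heq
      simp at heq

lemma bmaxN_pred (L : List (Int × Int)) {k r : Int} (h : (r, k) ∉ L) :
    bmaxN L k r = bmaxN L k (r - 1) := by
  unfold bmaxN
  rw [List.filterMap_congr ?_]
  intro p hp
  have hne : p ≠ (r, k) := fun he => h (he ▸ hp)
  by_cases hk : p.2 = k
  · have h1 : p.1 ≠ r := by
      intro h1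
      exact hne (by ext <;> simp [h1, hk])
    have : (p.1 ≤ r) = (p.1 ≤ r - 1) := by
      apply propext; omega
    simp [hk, this]
  · simp [hk]

lemma neg_one_le_bmaxW (L : List (Int × Int)) (r k : Int) : -1 ≤ bmaxW L r k :=
  (PySem.List.le_foldl_max _ _).1

lemma le_bmaxW (L : List (Int × Int)) {r k c : Int} (h : (r, c) ∈ L) (hc : c ≤ k) :
    c ≤ bmaxW L r k :=
  (PySem.List.le_foldl_max _ _).2 c (List.mem_filterMap.mpr ⟨(r, c), h, by simp [hc]⟩)

lemma bmaxW_cases (L : List (Int × Int)) (r k : Int) :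
    bmaxW L r k = -1 ∨ ((r, bmaxW L r k) ∈ L ∧ bmaxW L r k ≤ k) := by
  unfold bmaxW
  rcases PySem.List.foldl_max_mem (L.filterMap (fun p => if p.1 = r ∧ p.2 ≤ k then some p.2 else none)) (-1) with h | h
  · exact Or.inl h
  · right
    rcases List.mem_filterMap.mp h with ⟨p, hp, heq⟩
    by_cases hcond : p.1 = r ∧ p.2 ≤ k
    · rw [if_pos hcond, Option.some.injEq] at heq
      rw [← heq]
      refine ⟨?_, hcond.2⟩
      have hpair : (r, p.2) = p := by ext <;> simp [hcond.1]
      rw [hpair]; exact hp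
    · rw [if_neg hcond] at heq
      simp at heq

lemma bmaxW_pred (L : List (Int × Int)) {r k : Int} (h : (r, k) ∉ L) :
    bmaxW L r k = bmaxW L r (k - 1) := by
  unfold bmaxW
  rw [List.filterMap_congr ?_]
  intro p hp
  have hne : p ≠ (r, k) := fun he => h (he ▸ hp)
  by_cases hk : p.1 = r
  · have h1 : p.2 ≠ k := by
      intro h1
      exact hne (by ext <;> simp [h1, hk])
    have : (p.2 ≤ k) = (p.2 ≤ k - 1) := by
      apply propext; omega
    simp [hk, this]
  · simp [hk]

lemma bminS_le_init (L : List (Int × Int)) (k r nr : Int) : bminS L k r nr ≤ nr :=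
  (PySem.List.foldl_min_le _ _).1

lemma bminS_le (L : List (Int × Int)) {k r c : Int} (nr : Int) (h : (c, k) ∈ L) (hc : r ≤ c) :
    bminS L k r nr ≤ c :=
  (PySem.List.foldl_min_le _ _).2 c (List.mem_filterMap.mpr ⟨(c, k), h, by simp [hc]⟩)

lemma bminS_cases (L : List (Int × Int)) (k r nr : Int) :
    bminS L k r nr = nr ∨ ((bminS L k r nr, k) ∈ L ∧ r ≤ bminS L k r nr) := by
  unfold bminS
  rcases PySem.List.foldl_min_mem (L.filterMap (fun p => if p.2 = k ∧ r ≤ p.1 then some p.1 else none)) nr with h | h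
  · exact Or.inl h
  · right
    rcases List.mem_filterMap.mp h with ⟨p, hp, heq⟩
    by_cases hcond : p.2 = k ∧ r ≤ p.1
    · rw [if_pos hcond, Option.some.injEq] at heq
      rw [← heq]
      refine ⟨?_, hcond.2⟩
      have hpair : (p.1, k) = p := by ext <;> simp [hcond.1]
      rw [hpair]; exact hp
    · rw [if_neg hcond] at heq
      simp at heq

lemma bminS_succ (L : List (Int × Int)) {k r : Int} (nr : Int) (h : (r, k) ∉ L) :
    bminS L k r nr = bminS L k (r + 1) nr := by
  unfold bminS
  rw [List.filterMap_congr ?_]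
  intro p hp
  have hne : p ≠ (r, k) := fun he => h (he ▸ hp)
  by_cases hk : p.2 = k
  · have h1 : p.1 ≠ r := by
      intro h1
      exact hne (by ext <;> simp [h1, hk])
    have : (r ≤ p.1) = (r + 1 ≤ p.1) := by
      apply propext; omega
    simp [hk, this]
  · simp [hk]

lemma bminE_le_init (L : List (Int × Int)) (r k nk : Int) : bminE L r k nk ≤ nk :=
  (PySem.List.foldl_min_le _ _).1

lemma bminE_le (L : List (Int × Int)) {r k c : Int} (nk : Int) (h : (r, c) ∈ L) (hc : k ≤ c) :
    bminE L r k nk ≤ c :=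
  (PySem.List.foldl_min_le _ _).2 c (List.mem_filterMap.mpr ⟨(r, c), h, by simp [hc]⟩)

lemma bminE_cases (L : List (Int × Int)) (r k nk : Int) :
    bminE L r k nk = nk ∨ ((r, bminE L r k nk) ∈ L ∧ k ≤ bminE L r k nk) := by
  unfold bminE
  rcases PySem.List.foldl_min_mem (L.filterMap (fun p => if p.1 = r ∧ k ≤ p.2 then some p.2 else none)) nk with h | h
  · exact Or.inl h
  · right
    rcases List.mem_filterMap.mp h with ⟨p, hp, heq⟩
    by_cases hcond : p.1 = r ∧ k ≤ p.2
    · rw [if_pos hcond, Option.some.injEq] at heq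
      rw [← heq]
      refine ⟨?_, hcond.2⟩
      have hpair : (r, p.2) = p := by ext <;> simp [hcond.1]
      rw [hpair]; exact hp
    · rw [if_neg hcond] at heq
      simp at heq

lemma bminE_succ (L : List (Int × Int)) {r k : Int} (nk : Int) (h : (r, k) ∉ L) :
    bminE L r k nk = bminE L r (k + 1) nk := by
  unfold bminE
  rw [List.filterMap_congr ?_]
  intro p hp
  have hne : p ≠ (r, k) := fun he => h (he ▸ hp)
  by_cases hk : p.1 = r
  · have h1 : p.2 ≠ k := by
      intro h1
      exact hne (by ext <;> simp [h1, hk])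
    have : (k ≤ p.2) = (k + 1 ≤ p.2) := by
      apply propext; omega
    simp [hk, this]
  · simp [hk]

-- A's roll loop computes the closed-form landing cell (direction N)
lemma rollA_N (cubes rem new : List (Int × Int)) (nr nk : Int) (k : Int) :
    ∀ (fuel : Nat) (r1 : Int), 0 ≤ r1 → r1 < (fuel : Int) → ∀ (r0 k0 : Int),
      rollA cubes rem new "N" nr nk fuel r1 k r0 k0 =
        new ++ [if (r1, k) ∈ cubes ∨ (r1, k) ∈ rem ∨ (r1, k) ∈ new then (r0, k0)
                else (min r1 (bmaxN (cubes ++ rem ++ new) k r1 + 1), k)] := by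
  intro fuel
  induction fuel with
  | zero => intro r1 h0 hf; exact absurd hf (by omega)
  | succ fuel ih =>
    intro r1 h0 hf r0 k0
    simp only [rollA, String.reduceEq, true_and, false_and, or_false, reduceIte]
    by_cases hocc : (r1, k) ∈ cubes ∨ (r1, k) ∈ rem ∨ (r1, k) ∈ new
    · rw [if_pos hocc, if_pos hocc]
    · rw [if_neg hocc, if_neg hocc]
      have hnL : (r1, k) ∉ cubes ++ rem ++ new := by
        simp only [List.mem_append]; tauto
      by_cases hb : r1 = 0
      · subst hb
        rw [if_pos rfl]
        have h1 := neg_one_le_bmaxN (cubes ++ rem ++ new) k 0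
        have h2 : min (0 : Int) (bmaxN (cubes ++ rem ++ new) k 0 + 1) = 0 := by omega
        rw [h2]
      · rw [if_neg hb]
        have hb1 : (0:Int) ≤ r1 - 1 := by omega
        have hb2 : r1 - 1 < (fuel : Int) := by omega
        rw [ih (r1 - 1) hb1 hb2 r1 k]
        by_cases hocc' : (r1 - 1, k) ∈ cubes ∨ (r1 - 1, k) ∈ rem ∨ (r1 - 1, k) ∈ new
        · rw [if_pos hocc']
          have hL : (r1 - 1, k) ∈ cubes ++ rem ++ new := by
            simp only [List.mem_append]; tauto
          have h1 := le_bmaxN (cubes ++ rem ++ new) (r := r1) hL (by omega)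
          have h2 : min r1 (bmaxN (cubes ++ rem ++ new) k r1 + 1) = r1 := by omega
          rw [h2]
        · rw [if_neg hocc']
          have hL' : (r1 - 1, k) ∉ cubes ++ rem ++ new := by
            simp only [List.mem_append]; tauto
          rw [← bmaxN_pred (cubes ++ rem ++ new) hnL]
          rcases bmaxN_cases (cubes ++ rem ++ new) k r1 with hc | ⟨hmem, hle⟩
          · have h2 : min (r1 - 1) (bmaxN (cubes ++ rem ++ new) k r1 + 1) =
                min r1 (bmaxN (cubes ++ rem ++ new) k r1 + 1) := by omega
            rw [h2]
          · have hne1 : bmaxN (cubes ++ rem ++ new) k r1 ≠ r1 := fun he => hnL (he ▸ hmem)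
            have hne2 : bmaxN (cubes ++ rem ++ new) k r1 ≠ r1 - 1 := fun he => hL' (he ▸ hmem)
            have h2 : min (r1 - 1) (bmaxN (cubes ++ rem ++ new) k r1 + 1) =
                min r1 (bmaxN (cubes ++ rem ++ new) k r1 + 1) := by omega
            rw [h2]

-- direction S
lemma rollA_S (cubes rem new : List (Int × Int)) (nr nk : Int) (k : Int) :
    ∀ (fuel : Nat) (r1 : Int), r1 ≤ nr - 1 → nr - 1 - r1 < (fuel : Int) → ∀ (r0 k0 : Int),
      rollA cubes rem new "S" nr nk fuel r1 k r0 k0 =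
        new ++ [if (r1, k) ∈ cubes ∨ (r1, k) ∈ rem ∨ (r1, k) ∈ new then (r0, k0)
                else (max r1 (bminS (cubes ++ rem ++ new) k r1 nr - 1), k)] := by
  intro fuel
  induction fuel with
  | zero => intro r1 h0 hf; exact absurd hf (by omega)
  | succ fuel ih =>
    intro r1 h0 hf r0 k0
    simp only [rollA, String.reduceEq, true_and, false_and, or_false, false_or, reduceIte]
    by_cases hocc : (r1, k) ∈ cubes ∨ (r1, k) ∈ rem ∨ (r1, k) ∈ new
    · rw [if_pos hocc, if_pos hocc]
    · rw [if_neg hocc, if_neg hocc]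
      have hnL : (r1, k) ∉ cubes ++ rem ++ new := by
        simp only [List.mem_append]; tauto
      by_cases hb : r1 = nr - 1
      · subst hb
        rw [if_pos rfl]
        have h1 := bminS_le_init (cubes ++ rem ++ new) k (nr - 1) nr
        have h2 : max (nr - 1 : Int) (bminS (cubes ++ rem ++ new) k (nr - 1) nr - 1) = nr - 1 := by
          omega
        rw [h2]
      · rw [if_neg hb]
        have hb1 : r1 + 1 ≤ nr - 1 := by omega
        have hb2 : nr - 1 - (r1 + 1) < (fuel : Int) := by omega
        rw [ih (r1 + 1) hb1 hb2 r1 k]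
        by_cases hocc' : (r1 + 1, k) ∈ cubes ∨ (r1 + 1, k) ∈ rem ∨ (r1 + 1, k) ∈ new
        · rw [if_pos hocc']
          have hL : (r1 + 1, k) ∈ cubes ++ rem ++ new := by
            simp only [List.mem_append]; tauto
          have h1 := bminS_le (cubes ++ rem ++ new) (r := r1) nr hL (by omega)
          have h2 : max r1 (bminS (cubes ++ rem ++ new) k r1 nr - 1) = r1 := by omega
          rw [h2]
        · rw [if_neg hocc']
          have hL' : (r1 + 1, k) ∉ cubes ++ rem ++ new := by
            simp only [List.mem_append]; tauto
          rw [← bminS_succ (cubes ++ rem ++ new) nr hnL]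
          rcases bminS_cases (cubes ++ rem ++ new) k r1 nr with hc | ⟨hmem, hle⟩
          · have h2 : max (r1 + 1) (bminS (cubes ++ rem ++ new) k r1 nr - 1) =
                max r1 (bminS (cubes ++ rem ++ new) k r1 nr - 1) := by omega
            rw [h2]
          · have hne1 : bminS (cubes ++ rem ++ new) k r1 nr ≠ r1 := fun he => hnL (he ▸ hmem)
            have hne2 : bminS (cubes ++ rem ++ new) k r1 nr ≠ r1 + 1 := fun he => hL' (he ▸ hmem)
            have h2 : max (r1 + 1) (bminS (cubes ++ rem ++ new) k r1 nr - 1) =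
                max r1 (bminS (cubes ++ rem ++ new) k r1 nr - 1) := by omega
            rw [h2]

-- direction W
lemma rollA_W (cubes rem new : List (Int × Int)) (nr nk : Int) (r : Int) :
    ∀ (fuel : Nat) (k1 : Int), 0 ≤ k1 → k1 < (fuel : Int) → ∀ (r0 k0 : Int),
      rollA cubes rem new "W" nr nk fuel r k1 r0 k0 =
        new ++ [if (r, k1) ∈ cubes ∨ (r, k1) ∈ rem ∨ (r, k1) ∈ new then (r0, k0)
                else (r, min k1 (bmaxW (cubes ++ rem ++ new) r k1 + 1))] := by
  intro fuel
  induction fuel with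
  | zero => intro k1 h0 hf; exact absurd hf (by omega)
  | succ fuel ih =>
    intro k1 h0 hf r0 k0
    simp only [rollA, String.reduceEq, true_and, false_and, or_false, false_or, reduceIte]
    by_cases hocc : (r, k1) ∈ cubes ∨ (r, k1) ∈ rem ∨ (r, k1) ∈ new
    · rw [if_pos hocc, if_pos hocc]
    · rw [if_neg hocc, if_neg hocc]
      have hnL : (r, k1) ∉ cubes ++ rem ++ new := by
        simp only [List.mem_append]; tauto
      by_cases hb : k1 = 0
      · subst hb
        rw [if_pos rfl]
        have h1 := neg_one_le_bmaxW (cubes ++ rem ++ new) r 0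
        have h2 : min (0 : Int) (bmaxW (cubes ++ rem ++ new) r 0 + 1) = 0 := by omega
        rw [h2]
      · rw [if_neg hb]
        have hb1 : (0:Int) ≤ k1 - 1 := by omega
        have hb2 : k1 - 1 < (fuel : Int) := by omega
        rw [ih (k1 - 1) hb1 hb2 r k1]
        by_cases hocc' : (r, k1 - 1) ∈ cubes ∨ (r, k1 - 1) ∈ rem ∨ (r, k1 - 1) ∈ new
        · rw [if_pos hocc']
          have hL : (r, k1 - 1) ∈ cubes ++ rem ++ new := by
            simp only [List.mem_append]; tauto
          have h1 := le_bmaxW (cubes ++ rem ++ new) (k := k1) hL (by omega)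
          have h2 : min k1 (bmaxW (cubes ++ rem ++ new) r k1 + 1) = k1 := by omega
          rw [h2]
        · rw [if_neg hocc']
          have hL' : (r, k1 - 1) ∉ cubes ++ rem ++ new := by
            simp only [List.mem_append]; tauto
          rw [← bmaxW_pred (cubes ++ rem ++ new) hnL]
          rcases bmaxW_cases (cubes ++ rem ++ new) r k1 with hc | ⟨hmem, hle⟩
          · have h2 : min (k1 - 1) (bmaxW (cubes ++ rem ++ new) r k1 + 1) =
                min k1 (bmaxW (cubes ++ rem ++ new) r k1 + 1) := by omega
            rw [h2]
          · have hne1 : bmaxW (cubes ++ rem ++ new) r k1 ≠ k1 := fun he => hnL (he ▸ hmem)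
            have hne2 : bmaxW (cubes ++ rem ++ new) r k1 ≠ k1 - 1 := fun he => hL' (he ▸ hmem)
            have h2 : min (k1 - 1) (bmaxW (cubes ++ rem ++ new) r k1 + 1) =
                min k1 (bmaxW (cubes ++ rem ++ new) r k1 + 1) := by omega
            rw [h2]

-- direction E
lemma rollA_E (cubes rem new : List (Int × Int)) (nr nk : Int) (r : Int) :
    ∀ (fuel : Nat) (k1 : Int), k1 ≤ nk - 1 → nk - 1 - k1 < (fuel : Int) → ∀ (r0 k0 : Int),
      rollA cubes rem new "E" nr nk fuel r k1 r0 k0 =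
        new ++ [if (r, k1) ∈ cubes ∨ (r, k1) ∈ rem ∨ (r, k1) ∈ new then (r0, k0)
                else (r, max k1 (bminE (cubes ++ rem ++ new) r k1 nk - 1))] := by
  intro fuel
  induction fuel with
  | zero => intro k1 h0 hf; exact absurd hf (by omega)
  | succ fuel ih =>
    intro k1 h0 hf r0 k0
    simp only [rollA, String.reduceEq, true_and, false_and, false_or, reduceIte]
    by_cases hocc : (r, k1) ∈ cubes ∨ (r, k1) ∈ rem ∨ (r, k1) ∈ new
    · rw [if_pos hocc, if_pos hocc]
    · rw [if_neg hocc, if_neg hocc]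
      have hnL : (r, k1) ∉ cubes ++ rem ++ new := by
        simp only [List.mem_append]; tauto
      by_cases hb : k1 = nk - 1
      · subst hb
        rw [if_pos rfl]
        have h1 := bminE_le_init (cubes ++ rem ++ new) r (nk - 1) nk
        have h2 : max (nk - 1 : Int) (bminE (cubes ++ rem ++ new) r (nk - 1) nk - 1) = nk - 1 := by
          omega
        rw [h2]
      · rw [if_neg hb]
        have hb1 : k1 + 1 ≤ nk - 1 := by omega
        have hb2 : nk - 1 - (k1 + 1) < (fuel : Int) := by omega
        rw [ih (k1 + 1) hb1 hb2 r k1]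
        by_cases hocc' : (r, k1 + 1) ∈ cubes ∨ (r, k1 + 1) ∈ rem ∨ (r, k1 + 1) ∈ new
        · rw [if_pos hocc']
          have hL : (r, k1 + 1) ∈ cubes ++ rem ++ new := by
            simp only [List.mem_append]; tauto
          have h1 := bminE_le (cubes ++ rem ++ new) (k := k1) nk hL (by omega)
          have h2 : max k1 (bminE (cubes ++ rem ++ new) r k1 nk - 1) = k1 := by omega
          rw [h2]
        · rw [if_neg hocc']
          have hL' : (r, k1 + 1) ∉ cubes ++ rem ++ new := by
            simp only [List.mem_append]; tauto
          rw [← bminE_succ (cubes ++ rem ++ new) nk hnL]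
          rcases bminE_cases (cubes ++ rem ++ new) r k1 nk with hc | ⟨hmem, hle⟩
          · have h2 : max (k1 + 1) (bminE (cubes ++ rem ++ new) r k1 nk - 1) =
                max k1 (bminE (cubes ++ rem ++ new) r k1 nk - 1) := by omega
            rw [h2]
          · have hne1 : bminE (cubes ++ rem ++ new) r k1 nk ≠ k1 := fun he => hnL (he ▸ hmem)
            have hne2 : bminE (cubes ++ rem ++ new) r k1 nk ≠ k1 + 1 := fun he => hL' (he ▸ hmem)
            have h2 : max (k1 + 1) (bminE (cubes ++ rem ++ new) r k1 nk - 1) =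
                max k1 (bminE (cubes ++ rem ++ new) r k1 nk - 1) := by omega
            rw [h2]

-- landing in closed form when the rock is blocked on its start cell: it stays put
lemma outBlocked (cubes rest new : List (Int × Int)) (dir : String) (nr nk r k : Int)
    (hL : (r, k) ∈ cubes ++ rest ++ new) :
    (if dir = "N" then (min r (bmaxN (cubes ++ rest ++ new) k r + 1), k)
     else if dir = "S" then (max r (bminS (cubes ++ rest ++ new) k r nr - 1), k)
     else if dir = "W" then (r, min k (bmaxW (cubes ++ rest ++ new) r k + 1))
     else (r, max k (bminE (cubes ++ rest ++ new) r k nk - 1))) = (r, k) := by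
  split_ifs
  · have h1 := le_bmaxN (cubes ++ rest ++ new) (r := r) hL (le_refl r)
    have h2 : min r (bmaxN (cubes ++ rest ++ new) k r + 1) = r := by omega
    rw [h2]
  · have h1 := bminS_le (cubes ++ rest ++ new) (r := r) nr hL (le_refl r)
    have h2 : max r (bminS (cubes ++ rest ++ new) k r nr - 1) = r := by omega
    rw [h2]
  · have h1 := le_bmaxW (cubes ++ rest ++ new) (k := k) hL (le_refl k)
    have h2 : min k (bmaxW (cubes ++ rest ++ new) r k + 1) = k := by omega
    rw [h2]
  · have h1 := bminE_le (cubes ++ rest ++ new) (k := k) nk hL (le_refl k)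
    have h2 : max k (bminE (cubes ++ rest ++ new) r k nk - 1) = k := by omega
    rw [h2]

-- A's first membership test hits on a blocked start cell, whatever the direction
lemma rollA_blocked (cubes rest new : List (Int × Int)) (dir : String) (nr nk r k : Int)
    (hocc : (r, k) ∈ cubes ∨ (r, k) ∈ rest ∨ (r, k) ∈ new) :
    rollA cubes rest new dir nr nk (tiltFuel r k nr nk) r k r k = new ++ [(r, k)] := by
  simp only [tiltFuel, rollA]
  rw [if_pos hocc]

-- the loop invariant "blocked in place or within the direction bound" survives one step
lemma invStep (bound : Int × Int → Prop) (cubes new rest : List (Int × Int)) (q out : Int × Int)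
    (H : ∀ p ∈ q :: rest, bound p ∨ p ∈ cubes ∨ 2 ≤ (q :: rest).count p ∨ p ∈ new)
    (hout : q ∈ rest → out = q) :
    ∀ p ∈ rest, bound p ∨ p ∈ cubes ∨ 2 ≤ rest.count p ∨ p ∈ new ++ [out] := by
  intro p hp
  rcases H p (List.mem_cons_of_mem _ hp) with h | h | h | h
  · exact Or.inl h
  · exact Or.inr (Or.inl h)
  · by_cases hpq : p = q
    · subst hpq
      rw [List.count_cons_self] at h
      have hm : p ∈ rest := List.count_pos_iff.mp (by omega)
      refine Or.inr (Or.inr (Or.inr ?_))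
      rw [hout hm]
      exact List.mem_append_right _ (List.mem_singleton.mpr rfl)
    · simp only [List.count_cons, beq_iff_eq] at h
      rw [if_neg (fun he => hpq he.symm), add_zero] at h
      exact Or.inr (Or.inr (Or.inl h))
  · exact Or.inr (Or.inr (Or.inr (List.mem_append_left _ h)))

lemma loop_N (cubes : List (Int × Int)) (nr nk : Int) :
    ∀ (pend new : List (Int × Int)),
      (∀ p ∈ pend, 0 ≤ p.1 ∨ p ∈ cubes ∨ 2 ≤ pend.count p ∨ p ∈ new) →
      tiltLoopA cubes "N" nr nk pend new = tiltLoopB cubes "N" nr nk pend new := by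
  intro pend
  induction pend with
  | nil => intro new _; rfl
  | cons p rest ih =>
    obtain ⟨r, k⟩ := p
    intro new h
    simp only [tiltLoopA, tiltLoopB, String.reduceEq, reduceIte]
    by_cases hocc : (r, k) ∈ cubes ∨ (r, k) ∈ rest ∨ (r, k) ∈ new
    · rw [rollA_blocked cubes rest new "N" nr nk r k hocc]
      have hL : (r, k) ∈ cubes ++ rest ++ new := by
        simp only [List.mem_append]; tauto
      have h1 := le_bmaxN (cubes ++ rest ++ new) (r := r) hL (le_refl r)
      have h2 : min r (bmaxN (cubes ++ rest ++ new) k r + 1) = r := by omega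
      rw [h2]
      exact ih _ (invStep _ cubes new rest (r, k) (r, k) h (fun _ => rfl))
    · have hr : 0 ≤ r := by
        rcases h (r, k) List.mem_cons_self with h' | h' | h' | h'
        · exact h'
        · exact absurd (Or.inl h') hocc
        · rw [List.count_cons_self] at h'
          exact absurd (Or.inr (Or.inl (List.count_pos_iff.mp (by omega)))) hocc
        · exact absurd (Or.inr (Or.inr h')) hocc
      rw [rollA_N cubes rest new nr nk k (tiltFuel r k nr nk) r hr (by unfold tiltFuel; omega) r k]
      rw [if_neg hocc]
      exact ih _ (invStep _ cubes new rest (r, k) _ h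
        (fun hq => absurd (Or.inr (Or.inl hq)) hocc))

lemma loop_S (cubes : List (Int × Int)) (nr nk : Int) :
    ∀ (pend new : List (Int × Int)),
      (∀ p ∈ pend, p.1 ≤ nr - 1 ∨ p ∈ cubes ∨ 2 ≤ pend.count p ∨ p ∈ new) →
      tiltLoopA cubes "S" nr nk pend new = tiltLoopB cubes "S" nr nk pend new := by
  intro pend
  induction pend with
  | nil => intro new _; rfl
  | cons p rest ih =>
    obtain ⟨r, k⟩ := p
    intro new h
    simp only [tiltLoopA, tiltLoopB, String.reduceEq, reduceIte]
    by_cases hocc : (r, k) ∈ cubes ∨ (r, k) ∈ rest ∨ (r, k) ∈ new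
    · rw [rollA_blocked cubes rest new "S" nr nk r k hocc]
      have hL : (r, k) ∈ cubes ++ rest ++ new := by
        simp only [List.mem_append]; tauto
      have h1 := bminS_le (cubes ++ rest ++ new) (r := r) nr hL (le_refl r)
      have h2 : max r (bminS (cubes ++ rest ++ new) k r nr - 1) = r := by omega
      rw [h2]
      exact ih _ (invStep _ cubes new rest (r, k) (r, k) h (fun _ => rfl))
    · have hr : r ≤ nr - 1 := by
        rcases h (r, k) List.mem_cons_self with h' | h' | h' | h'
        · exact h'
        · exact absurd (Or.inl h') hocc
        · rw [List.count_cons_self] at h'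
          exact absurd (Or.inr (Or.inl (List.count_pos_iff.mp (by omega)))) hocc
        · exact absurd (Or.inr (Or.inr h')) hocc
      rw [rollA_S cubes rest new nr nk k (tiltFuel r k nr nk) r hr (by unfold tiltFuel; omega) r k]
      rw [if_neg hocc]
      exact ih _ (invStep _ cubes new rest (r, k) _ h
        (fun hq => absurd (Or.inr (Or.inl hq)) hocc))

lemma loop_W (cubes : List (Int × Int)) (nr nk : Int) :
    ∀ (pend new : List (Int × Int)),
      (∀ p ∈ pend, 0 ≤ p.2 ∨ p ∈ cubes ∨ 2 ≤ pend.count p ∨ p ∈ new) →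
      tiltLoopA cubes "W" nr nk pend new = tiltLoopB cubes "W" nr nk pend new := by
  intro pend
  induction pend with
  | nil => intro new _; rfl
  | cons p rest ih =>
    obtain ⟨r, k⟩ := p
    intro new h
    simp only [tiltLoopA, tiltLoopB, String.reduceEq, reduceIte]
    by_cases hocc : (r, k) ∈ cubes ∨ (r, k) ∈ rest ∨ (r, k) ∈ new
    · rw [rollA_blocked cubes rest new "W" nr nk r k hocc]
      have hL : (r, k) ∈ cubes ++ rest ++ new := by
        simp only [List.mem_append]; tauto
      have h1 := le_bmaxW (cubes ++ rest ++ new) (k := k) hL (le_refl k)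
      have h2 : min k (bmaxW (cubes ++ rest ++ new) r k + 1) = k := by omega
      rw [h2]
      exact ih _ (invStep _ cubes new rest (r, k) (r, k) h (fun _ => rfl))
    · have hk : 0 ≤ k := by
        rcases h (r, k) List.mem_cons_self with h' | h' | h' | h'
        · exact h'
        · exact absurd (Or.inl h') hocc
        · rw [List.count_cons_self] at h'
          exact absurd (Or.inr (Or.inl (List.count_pos_iff.mp (by omega)))) hocc
        · exact absurd (Or.inr (Or.inr h')) hocc
      rw [rollA_W cubes rest new nr nk r (tiltFuel r k nr nk) k hk (by unfold tiltFuel; omega) r k]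
      rw [if_neg hocc]
      exact ih _ (invStep _ cubes new rest (r, k) _ h
        (fun hq => absurd (Or.inr (Or.inl hq)) hocc))

lemma loop_E (cubes : List (Int × Int)) (nr nk : Int) :
    ∀ (pend new : List (Int × Int)),
      (∀ p ∈ pend, p.2 ≤ nk - 1 ∨ p ∈ cubes ∨ 2 ≤ pend.count p ∨ p ∈ new) →
      tiltLoopA cubes "E" nr nk pend new = tiltLoopB cubes "E" nr nk pend new := by
  intro pend
  induction pend with
  | nil => intro new _; rfl
  | cons p rest ih =>
    obtain ⟨r, k⟩ := p
    intro new h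
    simp only [tiltLoopA, tiltLoopB, String.reduceEq, reduceIte]
    by_cases hocc : (r, k) ∈ cubes ∨ (r, k) ∈ rest ∨ (r, k) ∈ new
    · rw [rollA_blocked cubes rest new "E" nr nk r k hocc]
      have hL : (r, k) ∈ cubes ++ rest ++ new := by
        simp only [List.mem_append]; tauto
      have h1 := bminE_le (cubes ++ rest ++ new) (k := k) nk hL (le_refl k)
      have h2 : max k (bminE (cubes ++ rest ++ new) r k nk - 1) = k := by omega
      rw [h2]
      exact ih _ (invStep _ cubes new rest (r, k) (r, k) h (fun _ => rfl))
    · have hk : k ≤ nk - 1 := by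
        rcases h (r, k) List.mem_cons_self with h' | h' | h' | h'
        · exact h'
        · exact absurd (Or.inl h') hocc
        · rw [List.count_cons_self] at h'
          exact absurd (Or.inr (Or.inl (List.count_pos_iff.mp (by omega)))) hocc
        · exact absurd (Or.inr (Or.inr h')) hocc
      rw [rollA_E cubes rest new nr nk r (tiltFuel r k nr nk) k hk (by unfold tiltFuel; omega) r k]
      rw [if_neg hocc]
      exact ih _ (invStep _ cubes new rest (r, k) _ h
        (fun hq => absurd (Or.inr (Or.inl hq)) hocc))

-- any direction string: if every rock starts blocked, nothing moves on either side
lemma loop_any (cubes : List (Int × Int)) (dir : String) (nr nk : Int) :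
    ∀ (pend new : List (Int × Int)),
      (∀ p ∈ pend, p ∈ cubes ∨ 2 ≤ pend.count p ∨ p ∈ new) →
      tiltLoopA cubes dir nr nk pend new = tiltLoopB cubes dir nr nk pend new := by
  intro pend
  induction pend with
  | nil => intro new _; rfl
  | cons p rest ih =>
    obtain ⟨r, k⟩ := p
    intro new h
    simp only [tiltLoopA, tiltLoopB]
    have hocc : (r, k) ∈ cubes ∨ (r, k) ∈ rest ∨ (r, k) ∈ new := by
      rcases h (r, k) List.mem_cons_self with h' | h' | h'
      · exact Or.inl h'
      · rw [List.count_cons_self] at h'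
        exact Or.inr (Or.inl (List.count_pos_iff.mp (by omega)))
      · exact Or.inr (Or.inr h')
    have hL : (r, k) ∈ cubes ++ rest ++ new := by
      simp only [List.mem_append]; tauto
    rw [rollA_blocked cubes rest new dir nr nk r k hocc,
        outBlocked cubes rest new dir nr nk r k hL]
    refine ih _ ?_
    have := invStep (fun _ => False) cubes new rest (r, k) (r, k)
      (fun p hp => Or.inr (h p hp)) (fun _ => rfl)
    intro p hp
    rcases this p hp with h' | h' | h' | h'
    · exact absurd h' id
    · exact Or.inl h'
    · exact Or.inr (Or.inl h')
    · exact Or.inr (Or.inr h')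

lemma tiltSort_perm (coords : List (Int × Int)) (dir : String) :
    (tiltSort coords dir).Perm coords := by
  unfold tiltSort
  split_ifs
  · exact PySem.List.sorted2_perm coords _ _ _
  · exact PySem.List.sorted2_perm coords _ _ _
  · exact PySem.List.sorted_perm coords _ _
  · exact PySem.List.sorted_perm coords _ _

lemma tiltSort_nil (dir : String) : tiltSort [] dir = [] := by
  unfold tiltSort
  split_ifs
  · exact (PySem.List.sorted2_perm [] _ _ _).eq_nil
  · exact (PySem.List.sorted2_perm [] _ _ _).eq_nil
  · exact (PySem.List.sorted_perm [] _ _).eq_nil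
  · exact (PySem.List.sorted_perm [] _ _).eq_nil

-- ===== VERDICT (by name: the statement is the Claim_ definition above) =====
theorem tilt_board_spec : Claim_equal_tilt_board := by
  intro coords cubes dir nr nk _ hpre
  unfold Spec_tilt_board tilt_board tilt_board_alt
  rcases hpre with hnil | hall | ⟨hd, hb⟩ | ⟨hd, hb⟩ | ⟨hd, hb⟩ | ⟨hd, hb⟩
  · rw [hnil, tiltSort_nil]; rfl
  · refine loop_any cubes dir nr nk _ [] (fun p hp => ?_)
    rcases hall p ((tiltSort_perm coords dir).subset hp) with h | h
    · exact Or.inl h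
    · exact Or.inr (Or.inl (by rw [(tiltSort_perm coords dir).count_eq]; exact h))
  · subst hd
    refine loop_N cubes nr nk _ [] (fun p hp => ?_)
    rcases hb p ((tiltSort_perm coords "N").subset hp) with h | h | h
    · exact Or.inl h
    · exact Or.inr (Or.inl h)
    · exact Or.inr (Or.inr (Or.inl (by rw [(tiltSort_perm coords "N").count_eq]; exact h)))
  · subst hd
    refine loop_S cubes nr nk _ [] (fun p hp => ?_)
    rcases hb p ((tiltSort_perm coords "S").subset hp) with h | h | h
    · exact Or.inl h
    · exact Or.inr (Or.inl h)
    · exact Or.inr (Or.inr (Or.inl (by rw [(tiltSort_perm coords "S").count_eq]; exact h)))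
  · subst hd
    refine loop_W cubes nr nk _ [] (fun p hp => ?_)
    rcases hb p ((tiltSort_perm coords "W").subset hp) with h | h | h
    · exact Or.inl h
    · exact Or.inr (Or.inl h)
    · exact Or.inr (Or.inr (Or.inl (by rw [(tiltSort_perm coords "W").count_eq]; exact h)))
  · subst hd
    refine loop_E cubes nr nk _ [] (fun p hp => ?_)
    rcases hb p ((tiltSort_perm coords "E").subset hp) with h | h | h
    · exact Or.inl h
    · exact Or.inr (Or.inl h)
    · exact Or.inr (Or.inr (Or.inl (by rw [(tiltSort_perm coords "E").count_eq]; exact h)))
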